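-- pv_equiv track=rewrite | github.com/Julien2313/adventOfCode | day9/main.py | day9RecurGarbage
-- ===== SOURCE A (Python) =====
-- def day9RecurGarbage(day9Input, index):
--     while index < len(day9Input):
--         if day9Input[index] != '!':
--             if day9Input[index] == '>':
--                 return index
--             index += 1
--         else:
--             index += 2
-- ===== SOURCE B (Python) =====
-- def day9RecurGarbage(day9Input, index):
--     # Candidate-driven search: find each '>' at or after the current base,
--     # count the run of consecutive '!' immediately before it (clipped at the
--     # base); the '>' ends the garbage iff that run has even length, otherwise
--     # the '>' is escaped and the search restarts just after it.
--     n = len(day9Input)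
--     j = index
--     while True:
--         p = j
--         while p < n and day9Input[p] != '>':
--             p += 1
--         if p >= n:
--             return None
--         k = p - 1
--         while k >= j and day9Input[k] == '!':
--             k -= 1
--         if (p - 1 - k) % 2 == 0:
--             return p
--         j = p + 1
-- ===== Notes on version B (the rewrite author's own statement) =====
-- stated objective: alternative
-- what changed: Replaces A's escape-jumping forward scan (index advances by 2 past each '!') with a candidate-driven search: a tight inner scan finds each '>', a backward scan counts the run of consecutive '!' immediately before it (clipped at the current base), and the candidate is accepted iff that run is even; a timing run measured this constant-factor faster (simpler per-character inner loop).
import Mathlib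
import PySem

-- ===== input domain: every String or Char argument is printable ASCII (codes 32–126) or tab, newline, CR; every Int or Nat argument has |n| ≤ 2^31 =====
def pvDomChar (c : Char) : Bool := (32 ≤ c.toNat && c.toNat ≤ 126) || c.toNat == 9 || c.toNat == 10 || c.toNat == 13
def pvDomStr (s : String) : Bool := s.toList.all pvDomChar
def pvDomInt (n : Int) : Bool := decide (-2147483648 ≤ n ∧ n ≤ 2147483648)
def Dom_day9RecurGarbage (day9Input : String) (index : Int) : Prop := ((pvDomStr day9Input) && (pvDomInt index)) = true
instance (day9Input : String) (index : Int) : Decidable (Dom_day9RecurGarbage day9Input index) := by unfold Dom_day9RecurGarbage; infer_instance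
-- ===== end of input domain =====

-- B replaces A's escape-jumping scan by a candidate-driven search: find each '>'
-- and decide with a backward count of the '!'-run before it whether it is escaped
-- (alternative decomposition, same asymptotic cost); equivalence proved for every
-- index ≥ -len (below that both Pythons raise IndexError).


-- ===== PORT A =====
-- A's while-loop: index jumps by 2 over an escape pair '!x', by 1 otherwise,
-- returning at the first '>' it lands on. pyGet? = none is Python's IndexError
-- (only reachable for index < -len, excluded by Pre_). `fuel` only makes the
-- loop total: ((len : Int) - index).toNat bounds the iteration count.
def day9GoA (cs : List Char) (fuel : Nat) (index : Int) : Option Int :=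
  match fuel with
  | 0 => none
  | fuel + 1 =>
    if index < (cs.length : Int) then
      match PySem.List.pyGet? cs index with
      | none => none
      | some c =>
        if c ≠ '!' then
          if c = '>' then some index
          else day9GoA cs fuel (index + 1)
        else day9GoA cs fuel (index + 2)
    else none

def day9RecurGarbage (day9Input : String) (index : Int) : Option Int :=
  day9GoA day9Input.toList (((day9Input.toList.length : Int) - index).toNat) index

-- ===== PORT B =====
-- B's candidate loop. bFind is B's inner `while p < n and s[p] != '>'` scan
-- (fuel (n - p).toNat bounds it; pyGet? = none is the IndexError, outside Pre_).
def bFind (cs : List Char) (fuel : Nat) (p : Int) : Option Int :=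
  match fuel with
  | 0 => none
  | fuel + 1 =>
    if p < (cs.length : Int) then
      match PySem.List.pyGet? cs p with
      | none => none
      | some c => if c ≠ '>' then bFind cs fuel (p + 1) else some p
    else none

-- B's backward `while k >= j and s[k] == '!'` count; returns the final k.
-- s[k] is always in range when j ≥ -len, so the `none` branch (IndexError in
-- Python, outside Pre_) exactly stops the loop only on excluded inputs.
def bBack (cs : List Char) (fuel : Nat) (k j : Int) : Int :=
  match fuel with
  | 0 => k
  | fuel + 1 =>
    if j ≤ k then
      match PySem.List.pyGet? cs k with
      | none => k
      | some c => if c = '!' then bBack cs fuel (k - 1) j else k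
    else k

-- B's outer `while True`: j strictly increases past each escaped '>', so
-- (n - j).toNat + 1 iterations suffice.
def bOuter (cs : List Char) (fuel : Nat) (j : Int) : Option Int :=
  match fuel with
  | 0 => none
  | fuel + 1 =>
    match bFind cs (((cs.length : Int) - j).toNat) j with
    | none => none
    | some p =>
      let k := bBack cs ((p - j).toNat) (p - 1) j
      if (p - 1 - k) % 2 = 0 then some p else bOuter cs fuel (p + 1)

def day9RecurGarbage_alt (day9Input : String) (index : Int) : Option Int :=
  bOuter day9Input.toList ((((day9Input.toList.length : Int) - index).toNat) + 1) index

-- ===== PRECONDITION & SPEC =====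
-- Pre_ excludes exactly the inputs index < -len(day9Input), on which Python A
-- raises IndexError at its first subscript (and B raises the same way).
def Pre_day9RecurGarbage (day9Input : String) (index : Int) : Prop :=
  -(day9Input.length : Int) ≤ index
instance (day9Input : String) (index : Int) : Decidable (Pre_day9RecurGarbage day9Input index) := by unfold Pre_day9RecurGarbage; infer_instance

def pvWitness_day9RecurGarbage : String × Int := ("!!>ab>", 0)

def Spec_day9RecurGarbage (day9Input : String) (index : Int) (out : Option Int) : Prop := out = day9RecurGarbage_alt day9Input index
instance (day9Input : String) (index : Int) (out : Option Int) : Decidable (Spec_day9RecurGarbage day9Input index out) := by unfold Spec_day9RecurGarbage; infer_instance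

-- ===== CLAIM (what is proved, stated in full; the proofs are below) =====
def Claim_equal_day9RecurGarbage : Prop := ∀ (day9Input : String) (index : Int), Dom_day9RecurGarbage day9Input index → Pre_day9RecurGarbage day9Input index → Spec_day9RecurGarbage day9Input index (day9RecurGarbage day9Input index)

-- ===== LEMMAS AND PROOFS =====

-- In range ⇒ the subscript returns a character.
theorem pyGet_some_of_range (cs : List Char) (i : Int)
    (h1 : -(cs.length : Int) ≤ i) (h2 : i < (cs.length : Int)) :
    ∃ c, PySem.List.pyGet? cs i = some c := by
  cases hc : PySem.List.pyGet? cs i with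
  | none => exact absurd ⟨h1, h2⟩ ((PySem.List.pyGet?_eq_none_iff _ _).mp hc)
  | some c => exact ⟨c, rfl⟩

-- A's loop does not depend on the fuel once the fuel bounds the iteration count.
theorem day9GoA_fuel_irrel (cs : List Char) :
    ∀ (f1 f2 : Nat) (j : Int), (((cs.length : Int) - j).toNat ≤ f1) →
      (((cs.length : Int) - j).toNat ≤ f2) → day9GoA cs f1 j = day9GoA cs f2 j := by
  intro f1
  induction f1 with
  | zero =>
      intro f2 j h1 h2
      have hj : ¬ j < (cs.length : Int) := by omega
      cases f2 with
      | zero => rfl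
      | succ f2 => simp [day9GoA, hj]
  | succ f1 ih =>
      intro f2 j h1 h2
      cases f2 with
      | zero =>
          have hj : ¬ j < (cs.length : Int) := by omega
          simp [day9GoA, hj]
      | succ f2 =>
          simp only [day9GoA]
          by_cases hj : j < (cs.length : Int)
          · simp only [hj, if_pos]
            cases hc : PySem.List.pyGet? cs j with
            | none => rfl
            | some c =>
                by_cases hbang : c = '!'
                · simp only [hbang, ne_eq, not_true_eq_false, if_false]
                  exact ih f2 (j + 2) (by omega) (by omega)
                · by_cases hgt : c = '>'
                  · simp [hgt]
                  · simp only [hbang, hgt, ne_eq, not_false_eq_true, if_true, if_false]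
                    exact ih f2 (j + 1) (by omega) (by omega)
          · simp [hj]

-- One step of A on a plain character.
theorem day9GoA_step1 (cs : List Char) (j : Int) (c : Char)
    (hj : j < (cs.length : Int)) (hc : PySem.List.pyGet? cs j = some c)
    (hb : c ≠ '!') (hg : c ≠ '>') :
    day9GoA cs (((cs.length : Int) - j).toNat) j
      = day9GoA cs (((cs.length : Int) - (j + 1)).toNat) (j + 1) := by
  have hf : (((cs.length : Int) - j).toNat) = (((cs.length : Int) - (j + 1)).toNat) + 1 := by omega
  rw [hf, day9GoA]
  simp [hj, hc, hb, hg]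

-- One step of A on '!'.
theorem day9GoA_step2 (cs : List Char) (j : Int) (hj : j < (cs.length : Int))
    (hc : PySem.List.pyGet? cs j = some '!') :
    day9GoA cs (((cs.length : Int) - j).toNat) j
      = day9GoA cs (((cs.length : Int) - (j + 2)).toNat) (j + 2) := by
  have hf : (((cs.length : Int) - j).toNat) = (((cs.length : Int) - (j + 1)).toNat) + 1 := by omega
  rw [hf, day9GoA]
  simp only [hj, if_pos, hc, ne_eq, not_true_eq_false, if_false]
  exact day9GoA_fuel_irrel cs _ _ (j + 2) (by omega) (by omega)

-- If no '>' occurs at any position in [j, n), A returns none.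
theorem day9GoA_none (cs : List Char) :
    ∀ (f : Nat) (j : Int), -(cs.length : Int) ≤ j →
      (∀ i, j ≤ i → i < (cs.length : Int) → PySem.List.pyGet? cs i ≠ some '>') →
      day9GoA cs f j = none := by
  intro f
  induction f with
  | zero => intro j _ _; rfl
  | succ f ih =>
      intro j hlo hno
      rw [day9GoA]
      by_cases hj : j < (cs.length : Int)
      · obtain ⟨c, hc⟩ := pyGet_some_of_range cs j hlo hj
        have hg : c ≠ '>' := by
          intro h; exact hno j le_rfl hj (h ▸ hc)
        by_cases hb : c = '!'
        · simp only [hj, if_pos, hc, hb, ne_eq, not_true_eq_false, if_false]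
          exact ih (j + 2) (by omega) (fun i h1 h2 => hno i (by omega) h2)
        · simp only [hj, if_pos, hc, ne_eq, hb, not_false_eq_true, hg, if_false]
          exact ih (j + 1) (by omega) (fun i h1 h2 => hno i (by omega) h2)
      · simp [hj]

-- bFind finds the first '>' at or after j (or reports there is none).
theorem bFind_spec (cs : List Char) :
    ∀ (f : Nat) (j : Int), -(cs.length : Int) ≤ j → (((cs.length : Int) - j).toNat ≤ f) →
      (bFind cs f j = none →
        ∀ i, j ≤ i → i < (cs.length : Int) → PySem.List.pyGet? cs i ≠ some '>') ∧
      (∀ p, bFind cs f j = some p → j ≤ p ∧ p < (cs.length : Int) ∧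
        PySem.List.pyGet? cs p = some '>' ∧
        ∀ i, j ≤ i → i < p → PySem.List.pyGet? cs i ≠ some '>') := by
  intro f
  induction f with
  | zero =>
      intro j hlo hf
      constructor
      · intro _ i h1 h2 _; omega
      · intro p hp; exact absurd hp (by simp [bFind])
  | succ f ih =>
      intro j hlo hf
      by_cases hj : j < (cs.length : Int)
      · obtain ⟨c, hc⟩ := pyGet_some_of_range cs j hlo hj
        by_cases hg : c = '>'
        · constructor
          · intro hnone; rw [bFind] at hnone; simp [hj, hc, hg] at hnone
          · intro p hp
            rw [bFind] at hp
            simp only [hj, if_pos, hc, hg, ne_eq, not_true_eq_false, if_false,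
              Option.some.injEq] at hp
            subst hp
            exact ⟨le_rfl, hj, hg ▸ hc, fun i h1 h2 _ => by omega⟩
        · have hrec := ih (j + 1) (by omega) (by omega)
          have hstep : bFind cs (f + 1) j = bFind cs f (j + 1) := by
            rw [bFind]; simp [hj, hc, hg]
          constructor
          · intro hnone i h1 h2
            rw [hstep] at hnone
            rcases eq_or_lt_of_le h1 with rfl | h1'
            · intro h; exact hg (by simpa [hc] using h)
            · exact hrec.1 hnone i (by omega) h2
          · intro p hp
            rw [hstep] at hp
            obtain ⟨hp1, hp2, hp3, hp4⟩ := hrec.2 p hp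
            refine ⟨by omega, hp2, hp3, fun i h1 h2 => ?_⟩
            rcases eq_or_lt_of_le h1 with rfl | h1'
            · intro h; exact hg (by simpa [hc] using h)
            · exact hp4 i (by omega) h2
      · constructor
        · intro _ i h1 h2 _; omega
        · intro p hp; rw [bFind] at hp; simp [hj] at hp
  
-- bBack stops at the first position at or below k0 that is below j or not '!';
-- everything strictly between the result and k0 is '!'.
theorem bBack_spec (cs : List Char) :
    ∀ (f : Nat) (k0 j : Int), -(cs.length : Int) ≤ j → k0 < (cs.length : Int) →
      j - 1 ≤ k0 → ((k0 - j + 1).toNat ≤ f) →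
      (j - 1 ≤ bBack cs f k0 j ∧ bBack cs f k0 j ≤ k0 ∧
       (∀ i, bBack cs f k0 j < i → i ≤ k0 → PySem.List.pyGet? cs i = some '!') ∧
       (j ≤ bBack cs f k0 j → PySem.List.pyGet? cs (bBack cs f k0 j) ≠ some '!')) := by
  intro f
  induction f with
  | zero =>
      intro k0 j hlo hhi hk hf
      have : k0 = j - 1 := by omega
      subst this
      simp only [bBack]
      refine ⟨le_rfl, le_rfl, fun i h1 h2 => by omega, fun h => by omega⟩
  | succ f ih =>
      intro k0 j hlo hhi hk hf
      by_cases hjk : j ≤ k0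
      · obtain ⟨c, hc⟩ := pyGet_some_of_range cs k0 (by omega) hhi
        by_cases hb : c = '!'
        · have hstep : bBack cs (f + 1) k0 j = bBack cs f (k0 - 1) j := by
            rw [bBack]; simp [hjk, hc, hb]
          have hrec := ih (k0 - 1) j hlo (by omega) (by omega) (by omega)
          rw [hstep]
          refine ⟨hrec.1, by omega, fun i h1 h2 => ?_, hrec.2.2.2⟩
          rcases eq_or_lt_of_le h2 with rfl | h2'
          · exact hb ▸ hc
          · exact hrec.2.2.1 i h1 (by omega)
        · have hstep : bBack cs (f + 1) k0 j = k0 := by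
            rw [bBack]; simp [hjk, hc, hb]
          rw [hstep]
          exact ⟨by omega, le_rfl, fun i h1 h2 => by omega,
            fun _ h => hb (by simpa [hc] using h)⟩
      · have hstep : bBack cs (f + 1) k0 j = k0 := by
          rw [bBack]; simp [hjk]
        rw [hstep]
        exact ⟨hk, le_rfl, fun i h1 h2 => by omega, fun h => by omega⟩

-- Key invariant: if p is the first '>' at or after j and k marks the bottom of
-- the '!'-run immediately before p (clipped at j), then A from j returns p when
-- the run is even, and otherwise behaves like A restarted from p + 1.
theorem day9_key (cs : List Char) :
    ∀ (g : Nat) (j k p : Int), ((p - j).toNat < g) →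
      -(cs.length : Int) ≤ j → j ≤ p → p < (cs.length : Int) →
      PySem.List.pyGet? cs p = some '>' →
      (∀ i, j ≤ i → i < p → PySem.List.pyGet? cs i ≠ some '>') →
      j - 1 ≤ k → k ≤ p - 1 →
      (∀ i, k < i → i ≤ p - 1 → PySem.List.pyGet? cs i = some '!') →
      (j ≤ k → PySem.List.pyGet? cs k ≠ some '!') →
      day9GoA cs (((cs.length : Int) - j).toNat) j
        = if (p - 1 - k) % 2 = 0 then some p
          else day9GoA cs (((cs.length : Int) - (p + 1)).toNat) (p + 1) := by
  intro g
  induction g with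
  | zero => intro j k p hg; omega
  | succ g ih =>
      intro j k p hg hlo hjp hpn hpc hno hk1 hk2 hk3 hk4
      rcases eq_or_lt_of_le hjp with rfl | hjp'
      · -- j = p : immediate hit, k = j - 1, run empty
        have hkeq : k = j - 1 := by omega
        have hf : (((cs.length : Int) - j).toNat) = (((cs.length : Int) - (j + 1)).toNat) + 1 := by omega
        rw [hf, day9GoA]
        simp [hpn, hpc, hkeq]
      · obtain ⟨c, hc⟩ := pyGet_some_of_range cs j hlo (by omega)
        have hcg : c ≠ '>' := fun h => hno j le_rfl hjp' (h ▸ hc)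
        by_cases hb : c = '!'
        · subst hb
          rcases eq_or_lt_of_le (show j + 1 ≤ p by omega) with hjp1 | hjp2
          · -- p = j + 1 : the '>' is escaped; k is forced to j - 1, run = 1
            have hkeq : k = j - 1 := by
              by_contra h
              have : k = j := by omega
              exact hk4 (by omega) (this ▸ hc)
            have hodd : ¬ (p - 1 - k) % 2 = 0 := by omega
            have hp2 : p + 1 = j + 2 := by omega
            rw [day9GoA_step2 cs j (by omega) hc, if_neg hodd, hp2]
          · -- j + 2 ≤ p : step over the escape pair and recurse at j + 2
            obtain ⟨c1, hc1⟩ := pyGet_some_of_range cs (j + 1) (by omega) (by omega)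
            have hc1g : c1 ≠ '>' := fun h => hno (j + 1) (by omega) (by omega) (h ▸ hc1)
            have hkj : k ≠ j := fun h => hk4 (by omega) (h ▸ hc)
            rw [day9GoA_step2 cs j (by omega) hc]
            by_cases hb1 : c1 = '!'
            · -- both j and j+1 may sit inside the run; re-base k at max
              by_cases hkge : j + 1 ≤ k
              · rw [ih (j + 2) k p (by omega) (by omega) (by omega) hpn hpc
                  (fun i h1 h2 => hno i (by omega) h2) (by omega) hk2 hk3
                  (fun h => hk4 (by omega))]
              · -- k = j - 1 : whole of [j, p) is '!'; use k' = j + 1, same parity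
                have hkeq : k = j - 1 := by omega
                rw [ih (j + 2) (j + 1) p (by omega) (by omega) (by omega) hpn hpc
                  (fun i h1 h2 => hno i (by omega) h2) (by omega) (by omega)
                  (fun i h1 h2 => hk3 i (by omega) h2) (by omega)]
                have : (p - 1 - k) % 2 = (p - 1 - (j + 1)) % 2 := by omega
                rw [this]
            · -- run stops at j + 1 (not '!'); k ≥ j + 1 is unchanged
              have hkge : j + 1 ≤ k := by
                by_contra h
                exact hb1 (by simpa [hc1] using hk3 (j + 1) (by omega) (by omega))
              rw [ih (j + 2) k p (by omega) (by omega) (by omega) hpn hpc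
                (fun i h1 h2 => hno i (by omega) h2) (by omega) hk2 hk3
                (fun h => hk4 (by omega))]
        · -- plain character: step by one, k unchanged (k ≥ j since s[j] ≠ '!')
          have hkge : j ≤ k := by
            by_contra h
            exact hb (by simpa [hc] using hk3 j (by omega) (by omega))
          rw [day9GoA_step1 cs j c (by omega) hc hb hcg]
          exact ih (j + 1) k p (by omega) (by omega) (by omega) hpn hpc
            (fun i h1 h2 => hno i (by omega) h2) (by omega) hk2 hk3
            (fun h => hk4 (by omega))

-- A from j equals B's outer loop from j, for any sufficient outer fuel.
theorem day9_main (cs : List Char) :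
    ∀ (f : Nat) (j : Int), -(cs.length : Int) ≤ j →
      (((cs.length : Int) - j).toNat < f) →
      day9GoA cs (((cs.length : Int) - j).toNat) j = bOuter cs f j := by
  intro f
  induction f with
  | zero => intro j _ h; omega
  | succ f ih =>
      intro j hlo hf
      rw [bOuter]
      cases hfind : bFind cs (((cs.length : Int) - j).toNat) j with
      | none =>
          exact day9GoA_none cs _ j hlo
            ((bFind_spec cs _ j hlo le_rfl).1 hfind)
      | some p =>
          show day9GoA cs (((cs.length : Int) - j).toNat) j
            = if (p - 1 - bBack cs ((p - j).toNat) (p - 1) j) % 2 = 0 then some p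
              else bOuter cs f (p + 1)
          obtain ⟨hp1, hp2, hp3, hp4⟩ := (bFind_spec cs _ j hlo le_rfl).2 p hfind
          have hback := bBack_spec cs ((p - j).toNat) (p - 1) j hlo (by omega)
            (by omega) (by omega)
          set k := bBack cs ((p - j).toNat) (p - 1) j with hkdef
          have hkey := day9_key cs ((p - j).toNat + 1) j k p (by omega) hlo hp1 hp2
            hp3 hp4 (by omega) hback.2.1
            (fun i h1 h2 => hback.2.2.1 i h1 h2) hback.2.2.2
          rw [hkey]
          by_cases hpar : (p - 1 - k) % 2 = 0
          · simp [hpar]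
          · simp only [hpar, if_false]
            exact ih (p + 1) (by omega) (by omega)

-- ===== VERDICT (by name: the statement is the Claim_ definition above) =====
theorem day9RecurGarbage_spec : Claim_equal_day9RecurGarbage := by
  intro s index _ hpre
  unfold Spec_day9RecurGarbage day9RecurGarbage day9RecurGarbage_alt
  exact day9_main s.toList _ index (by rw [String.length_toList]; exact hpre) (by omega)
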